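-- pv_equiv track=rewrite | github.com/Phbhan/Project-CNF-AI | GenerateTest.py | generateInputMatrix
-- ===== SOURCE A (Python) =====
-- def generateInputMatrix(output_matrix):
--     delta = [ (0, 0), (-1, -1), (-1, 0), (-1, 1), (0, -1), (0, 1), (1, -1), (1, 0), (1, 1) ]
--     def isValid(m, n, cur_pos):
--         return 0 <= cur_pos[0] < m and 0 <= cur_pos[1] < n
--
--     m, n = len(output_matrix), len(output_matrix[0])
--     input_matrix = [ [-1] * n for i in range(m)]
--     for i in range(m):
--         for j in range(n):
--             # đếm số ô xanh xung quanh ô (i, j)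
--             count = 0
--             for k in range(len(delta)):
--                 next_x, next_y = i + delta[k][0], j + delta[k][1]
--                 if isValid(m, n, (next_x, next_y)):
--                     if output_matrix[next_x][next_y] == 1:
--                         count += 1
--             if count == '0':
--                 count = '.'
--             input_matrix[i][j] = count
--     return input_matrix
-- ===== SOURCE B (Python) =====
-- def generateInputMatrix(output_matrix):
--     m, n = len(output_matrix), len(output_matrix[0])
--
--     def ind(i, j):
--         return 1 if 0 <= j < n and output_matrix[i][j] == 1 else 0
--
--     # separable convolution: horizontal 3-window sums, then vertical 3-window sums
--     horiz = [[ind(i, j - 1) + ind(i, j) + ind(i, j + 1) for j in range(n)]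
--              for i in range(m)]
--     return [[(horiz[i - 1][j] if i > 0 else 0) + horiz[i][j]
--              + (horiz[i + 1][j] if i < m - 1 else 0)
--              for j in range(n)]
--             for i in range(m)]
-- ===== Notes on version B (the rewrite author's own statement) =====
-- stated objective: faster
-- what changed: Replaced the per-cell scan over a 9-offset delta list (with a validity test per offset) by a separable two-pass convolution: one pass of horizontal 3-window sums, then one pass of vertical 3-window sums over that table.
import Mathlib
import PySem

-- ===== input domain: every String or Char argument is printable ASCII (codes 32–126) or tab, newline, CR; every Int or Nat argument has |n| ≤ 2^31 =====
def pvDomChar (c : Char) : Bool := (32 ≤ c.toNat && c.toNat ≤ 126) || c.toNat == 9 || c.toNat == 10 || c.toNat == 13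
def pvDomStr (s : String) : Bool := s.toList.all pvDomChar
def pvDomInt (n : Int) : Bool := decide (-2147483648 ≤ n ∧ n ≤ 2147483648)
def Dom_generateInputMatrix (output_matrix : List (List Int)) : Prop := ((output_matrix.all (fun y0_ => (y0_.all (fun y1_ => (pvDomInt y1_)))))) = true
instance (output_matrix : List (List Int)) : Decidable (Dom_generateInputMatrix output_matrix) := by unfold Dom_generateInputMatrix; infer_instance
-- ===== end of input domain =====

-- B replaces A's per-cell scan of the 9-offset delta list by a separable two-pass
-- convolution (horizontal 3-window sums, then vertical 3-window sums): a different
-- algorithm, measurably faster by a constant factor (fewer per-cell operations).  (The `count == '0'` branch of A is dead: count is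
-- always an int, so it is a no-op and is not ported.)

-- ===== PORT A =====
def generateInputMatrix (output_matrix : List (List Int)) : List (List Int) :=
  let delta : List (Int × Int) :=
    [(0,0),(-1,-1),(-1,0),(-1,1),(0,-1),(0,1),(1,-1),(1,0),(1,1)]
  let m : Int := output_matrix.length
  let n : Int := (PySem.List.pyGetD output_matrix 0 []).length  -- len(output_matrix[0]); IndexError on [] is excluded by Pre_
  (PySem.List.pyRange 0 m 1).map (fun i =>
    (PySem.List.pyRange 0 n 1).map (fun j =>
      delta.foldl (fun count d =>
        let next_x := i + d.1
        let next_y := j + d.2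
        if (0 ≤ next_x ∧ next_x < m) ∧ (0 ≤ next_y ∧ next_y < n) then  -- isValid
          if PySem.List.pyGetD (PySem.List.pyGetD output_matrix next_x []) next_y 0 = 1 then
            count + 1
          else count
        else count) 0))

-- ===== PORT B =====
def generateInputMatrix_alt (output_matrix : List (List Int)) : List (List Int) :=
  let m : Int := output_matrix.length
  let n : Int := (PySem.List.pyGetD output_matrix 0 []).length
  let ind : Int → Int → Int := fun i j =>
    if 0 ≤ j ∧ j < n ∧ PySem.List.pyGetD (PySem.List.pyGetD output_matrix i []) j 0 = 1
    then 1 else 0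
  let horiz : List (List Int) :=
    (PySem.List.pyRange 0 m 1).map (fun i =>
      (PySem.List.pyRange 0 n 1).map (fun j => ind i (j-1) + ind i j + ind i (j+1)))
  (PySem.List.pyRange 0 m 1).map (fun i =>
    (PySem.List.pyRange 0 n 1).map (fun j =>
      (if 0 < i then PySem.List.pyGetD (PySem.List.pyGetD horiz (i-1) []) j 0 else 0)
      + PySem.List.pyGetD (PySem.List.pyGetD horiz i []) j 0
      + (if i < m - 1 then PySem.List.pyGetD (PySem.List.pyGetD horiz (i+1) []) j 0 else 0)))

-- ===== PRECONDITION & SPEC =====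
-- Pre_ excludes exactly the inputs on which A raises IndexError: the empty matrix
-- (output_matrix[0]) and ragged matrices with a row shorter than the first row
-- (output_matrix[x][y] for y < len(output_matrix[0])).
def Pre_generateInputMatrix (output_matrix : List (List Int)) : Prop :=
  output_matrix ≠ [] ∧
  ∀ row ∈ output_matrix, (output_matrix.headD []).length ≤ row.length
instance (output_matrix : List (List Int)) : Decidable (Pre_generateInputMatrix output_matrix) := by
  unfold Pre_generateInputMatrix; infer_instance

def pvWitness_generateInputMatrix : List (List Int) := [[1, 0, 1], [0, 1, 2]]

def Spec_generateInputMatrix (output_matrix : List (List Int)) (out : List (List Int)) : Prop := out = generateInputMatrix_alt output_matrix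
instance (output_matrix : List (List Int)) (out : List (List Int)) : Decidable (Spec_generateInputMatrix output_matrix out) := by unfold Spec_generateInputMatrix; infer_instance

-- ===== CLAIM (what is proved, stated in full; the proofs are below) =====
def Claim_equal_generateInputMatrix : Prop := ∀ (output_matrix : List (List Int)), Dom_generateInputMatrix output_matrix → Pre_generateInputMatrix output_matrix → Spec_generateInputMatrix output_matrix (generateInputMatrix output_matrix)

-- ===== LEMMAS AND PROOFS =====

-- A's per-delta contribution: 1 iff (x, y) is in range and holds a 1.
def pvG (om : List (List Int)) (x y : Int) : Int :=
  if (0 ≤ x ∧ x < (om.length : Int)) ∧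
     (0 ≤ y ∧ y < ((PySem.List.pyGetD om 0 []).length : Int)) ∧
     PySem.List.pyGetD (PySem.List.pyGetD om x []) y 0 = 1
  then 1 else 0

-- B's indicator (row index known in range).
def pvInd (om : List (List Int)) (x y : Int) : Int :=
  if 0 ≤ y ∧ y < ((PySem.List.pyGetD om 0 []).length : Int) ∧
     PySem.List.pyGetD (PySem.List.pyGetD om x []) y 0 = 1
  then 1 else 0

lemma pvG_eq_ind (om : List (List Int)) {x : Int} (y : Int)
    (hx : 0 ≤ x ∧ x < (om.length : Int)) : pvG om x y = pvInd om x y := by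
  unfold pvG pvInd
  split_ifs with h1 h2 h2 <;> first | rfl | (exfalso; tauto)

lemma pvG_out (om : List (List Int)) {x : Int} (y : Int)
    (hx : ¬ (0 ≤ x ∧ x < (om.length : Int))) : pvG om x y = 0 := by
  unfold pvG
  rw [if_neg]
  intro h; exact hx h.1

-- row lookup into the horiz matrix of B
lemma pvHoriz_get (om : List (List Int)) (f : Int → Int → Int) {x : Int} (j : Int)
    (hx0 : 0 ≤ x) (hxm : x < (om.length : Int))
    (hj : j ∈ PySem.List.pyRange 0 ((PySem.List.pyGetD om 0 []).length : Int) 1) :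
    PySem.List.pyGetD (PySem.List.pyGetD
      ((PySem.List.pyRange 0 ((om.length : Int)) 1).map (fun i =>
        (PySem.List.pyRange 0 ((PySem.List.pyGetD om 0 []).length : Int) 1).map (fun y => f i y)))
      x []) j 0 = f x j := by
  have hk : x = ((x.toNat : Nat) : Int) := by omega
  have hkm : x.toNat < om.length := by omega
  rw [hk, PySem.List.pyGetD_map_pyRange _ _ _ _ hkm]
  have hj' := PySem.List.mem_pyRange_one.mp hj
  have hjk : j = ((j.toNat : Nat) : Int) := by omega
  have hjn : j.toNat < (PySem.List.pyGetD om 0 []).length := by omega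
  rw [hjk, PySem.List.pyGetD_map_pyRange _ _ _ _ hjn]

theorem generateInputMatrix_main (om : List (List Int)) :
    generateInputMatrix om = generateInputMatrix_alt om := by
  unfold generateInputMatrix generateInputMatrix_alt
  apply List.map_congr_left
  intro i hi
  apply List.map_congr_left
  intro j hj
  have hi' := PySem.List.mem_pyRange_one.mp hi
  have hj' := PySem.List.mem_pyRange_one.mp hj
  -- A's fold over the 9 deltas is the sum of the 9 indicators pvG
  have hstep : (fun (count : Int) (d : Int × Int) =>
      let next_x := i + d.1
      let next_y := j + d.2
      if (0 ≤ next_x ∧ next_x < (om.length : Int)) ∧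
         (0 ≤ next_y ∧ next_y < ((PySem.List.pyGetD om 0 []).length : Int)) then
        if PySem.List.pyGetD (PySem.List.pyGetD om next_x []) next_y 0 = 1 then
          count + 1
        else count
      else count)
      = fun (count : Int) d => count + pvG om (i + d.1) (j + d.2) := by
    funext c d
    simp only [pvG]
    split_ifs with h1 h2 h3 h3 <;> first | rfl | omega | tauto
  rw [hstep, PySem.List.foldl_add]
  -- B's cell: the three horiz lookups
  rw [pvHoriz_get om _ j hi'.1 hi'.2 hj]
  by_cases h0 : 0 < i
  · rw [if_pos h0, pvHoriz_get om _ j (by omega) (by omega) hj]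
    by_cases h1 : i < (om.length : Int) - 1
    · rw [if_pos h1, pvHoriz_get om _ j (by omega) (by omega) hj]
      simp only [List.map_cons, List.map_nil, List.sum_cons, List.sum_nil]
      rw [show i + -1 = i - 1 by ring, show i + 0 = i by ring]
      rw [pvG_eq_ind om (j+0) (x := i) (by omega), pvG_eq_ind om (j+-1) (x := i) (by omega),
          pvG_eq_ind om (j+1) (x := i) (by omega),
          pvG_eq_ind om (j+-1) (x := i - 1) (by omega),
          pvG_eq_ind om (j+0) (x := i - 1) (by omega),
          pvG_eq_ind om (j+1) (x := i - 1) (by omega),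
          pvG_eq_ind om (j+-1) (x := i + 1) (by omega),
          pvG_eq_ind om (j+0) (x := i + 1) (by omega),
          pvG_eq_ind om (j+1) (x := i + 1) (by omega)]
      simp only [pvInd]
      ring_nf
    · rw [if_neg h1]
      simp only [List.map_cons, List.map_nil, List.sum_cons, List.sum_nil]
      rw [show i + -1 = i - 1 by ring, show i + 0 = i by ring]
      rw [pvG_out om (j+-1) (x := i + 1) (by omega), pvG_out om (j+0) (x := i + 1) (by omega),
          pvG_out om (j+1) (x := i + 1) (by omega)]
      rw [pvG_eq_ind om (j+0) (x := i) (by omega), pvG_eq_ind om (j+-1) (x := i) (by omega),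
          pvG_eq_ind om (j+1) (x := i) (by omega),
          pvG_eq_ind om (j+-1) (x := i - 1) (by omega),
          pvG_eq_ind om (j+0) (x := i - 1) (by omega),
          pvG_eq_ind om (j+1) (x := i - 1) (by omega)]
      simp only [pvInd]
      ring_nf
  · rw [if_neg h0]
    by_cases h1 : i < (om.length : Int) - 1
    · rw [if_pos h1, pvHoriz_get om _ j (by omega) (by omega) hj]
      simp only [List.map_cons, List.map_nil, List.sum_cons, List.sum_nil]
      rw [show i + -1 = i - 1 by ring, show i + 0 = i by ring]
      rw [pvG_out om (j+-1) (x := i - 1) (by omega), pvG_out om (j+0) (x := i - 1) (by omega),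
          pvG_out om (j+1) (x := i - 1) (by omega)]
      rw [pvG_eq_ind om (j+0) (x := i) (by omega), pvG_eq_ind om (j+-1) (x := i) (by omega),
          pvG_eq_ind om (j+1) (x := i) (by omega),
          pvG_eq_ind om (j+-1) (x := i + 1) (by omega),
          pvG_eq_ind om (j+0) (x := i + 1) (by omega),
          pvG_eq_ind om (j+1) (x := i + 1) (by omega)]
      simp only [pvInd]
      ring_nf
    · rw [if_neg h1]
      simp only [List.map_cons, List.map_nil, List.sum_cons, List.sum_nil]
      rw [show i + -1 = i - 1 by ring, show i + 0 = i by ring]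
      rw [pvG_out om (j+-1) (x := i - 1) (by omega), pvG_out om (j+0) (x := i - 1) (by omega),
          pvG_out om (j+1) (x := i - 1) (by omega),
          pvG_out om (j+-1) (x := i + 1) (by omega), pvG_out om (j+0) (x := i + 1) (by omega),
          pvG_out om (j+1) (x := i + 1) (by omega)]
      rw [pvG_eq_ind om (j+0) (x := i) (by omega), pvG_eq_ind om (j+-1) (x := i) (by omega),
          pvG_eq_ind om (j+1) (x := i) (by omega)]
      simp only [pvInd]
      ring_nf

-- ===== VERDICT (by name: the statement is the Claim_ definition above) =====
theorem generateInputMatrix_spec : Claim_equal_generateInputMatrix := by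
  intro om _ _
  unfold Spec_generateInputMatrix
  exact generateInputMatrix_main om
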